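-- pv_equiv track=rewrite | github.com/shayan78690/DSA-Revision-using-Python | 7. Sliding Window/3. Advance Questions/number_of_subarrays_with_bound.py | count
-- ===== SOURCE A (Python) =====
-- def count(nums, bound):
--     res = 0
--     curr = 0
--
--     for num in nums:
--         if num <= bound:
--             curr += 1
--         else:
--             curr = 0
--         res += curr
--
--     return res
-- ===== SOURCE B (Python) =====
-- def count(nums, bound):
--     def run_len(xs):
--         k = 0
--         for x in xs:
--             if x > bound:
--                 break
--             k += 1
--         return k
--
--     total = 0
--     rest = nums
--     while rest:
--         if rest[0] <= bound:
--             L = run_len(rest)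
--             total += L * (L + 1) // 2
--             rest = rest[L:]
--         else:
--             rest = rest[1:]
--     return total
-- ===== Notes on version B (the rewrite author's own statement) =====
-- stated objective: alternative
-- what changed: B splits the list into maximal runs of elements <= bound and adds the closed-form triangular number L*(L+1)//2 per run, instead of A's per-element running counter.
import Mathlib
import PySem

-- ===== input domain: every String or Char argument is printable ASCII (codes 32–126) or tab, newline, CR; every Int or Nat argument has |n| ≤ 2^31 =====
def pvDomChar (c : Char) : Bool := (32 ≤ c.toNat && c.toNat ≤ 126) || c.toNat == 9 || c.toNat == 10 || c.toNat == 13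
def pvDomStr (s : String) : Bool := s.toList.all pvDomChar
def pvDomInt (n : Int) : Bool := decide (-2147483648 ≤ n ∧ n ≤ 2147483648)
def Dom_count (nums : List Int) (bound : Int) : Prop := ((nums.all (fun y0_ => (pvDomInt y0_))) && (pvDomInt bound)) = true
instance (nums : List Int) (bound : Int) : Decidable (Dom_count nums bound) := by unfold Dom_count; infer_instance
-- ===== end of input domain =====

-- B replaces A's per-element running counter by summing the closed-form triangular
-- number L*(L+1)//2 over the maximal runs of consecutive elements ≤ bound (alternative decomposition).

-- ===== PORT A =====
-- loop body of A: curr = curr+1 if num <= bound else 0; res += curr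
def countStep (bound : Int) (st : Int × Int) (num : Int) : Int × Int :=
  let curr := if num ≤ bound then st.2 + 1 else 0
  (st.1 + curr, curr)

def count (nums : List Int) (bound : Int) : Int :=
  (nums.foldl (countStep bound) (0, 0)).1

-- ===== PORT B =====
-- run_len: length of the maximal prefix of xs with x ≤ bound (the inner for/break loop)
def runLen (bound : Int) : List Int → Nat
  | [] => 0
  | x :: xs => if x > bound then 0 else runLen bound xs + 1

-- the while loop of B: peel one element (curr > bound) or one whole run (closed form)
def countGo (bound : Int) : List Int → Int
  | [] => 0
  | x :: xs =>
    if x ≤ bound then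
      let L : Int := ((runLen bound xs + 1 : Nat) : Int)
      PySem.Int.floordiv (L * (L + 1)) 2 + countGo bound (xs.drop (runLen bound xs))
    else countGo bound xs
termination_by l => l.length
decreasing_by
  all_goals (simp only [List.length_drop, List.length_cons]; omega)

def count_alt (nums : List Int) (bound : Int) : Int := countGo bound nums

-- ===== PRECONDITION & SPEC =====
def Spec_count (nums : List Int) (bound : Int) (out : Int) : Prop := out = count_alt nums bound
instance (nums : List Int) (bound : Int) (out : Int) : Decidable (Spec_count nums bound out) := by unfold Spec_count; infer_instance

-- ===== CLAIM (what is proved, stated in full; the proofs are below) =====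
def Claim_equal_count : Prop := ∀ (nums : List Int) (bound : Int), Dom_count nums bound → Spec_count nums bound (count nums bound)

-- ===== LEMMAS AND PROOFS =====

-- triangular number as B computes it
def tri (L : Nat) : Int := PySem.Int.floordiv ((L : Int) * ((L : Int) + 1)) 2

theorem tri_zero : tri 0 = 0 := by decide

theorem tri_succ (K : Nat) : tri (K + 1) = tri K + (K + 1) := by
  unfold tri
  rw [PySem.Int.floordiv_eq_ediv_of_pos (by omega), PySem.Int.floordiv_eq_ediv_of_pos (by omega)]
  push_cast
  have h : ((K : Int) + 1) * ((K : Int) + 1 + 1) = (K : Int) * ((K : Int) + 1) + 2 * ((K : Int) + 1) := by ring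
  rw [h, Int.add_mul_ediv_left _ _ (by norm_num)]

-- B's while loop splits off exactly one maximal run
theorem countGo_split (bound : Int) (l : List Int) :
    countGo bound l = tri (runLen bound l) + countGo bound (l.drop (runLen bound l)) := by
  cases l with
  | nil => simp [countGo, runLen, tri_zero]
  | cons x xs =>
    by_cases hx : x ≤ bound
    · have hgt : ¬ x > bound := by omega
      simp [countGo, runLen, tri, if_pos hx, if_neg hgt, List.drop_succ_cons]
    · have hgt : x > bound := by omega
      simp [countGo, runLen, if_neg hx, if_pos hgt, tri_zero]

-- invariant of A's fold: with pending counter c, a prefix run of length L contributes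
-- c*L + tri L, after which the counter is reset and B's run decomposition takes over
theorem foldl_count (bound : Int) (l : List Int) :
    ∀ (res c : Int),
      (l.foldl (countStep bound) (res, c)).1 =
        res + c * (runLen bound l : Int) + tri (runLen bound l)
          + countGo bound (l.drop (runLen bound l)) := by
  induction l with
  | nil => intro res c; simp [runLen, tri_zero, countGo]
  | cons x xs ih =>
    intro res c
    by_cases hx : x ≤ bound
    · have hgt : ¬ x > bound := by omega
      simp only [List.foldl_cons, countStep, if_pos hx, runLen, if_neg hgt,
        List.drop_succ_cons]
      rw [ih, tri_succ]
      push_cast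
      ring
    · have hgt : x > bound := by omega
      simp only [List.foldl_cons, countStep, if_neg hx, runLen, if_pos hgt,
        List.drop_zero, Nat.cast_zero]
      rw [ih]
      have hgo : countGo bound (x :: xs) = countGo bound xs := by
        simp [countGo, if_neg hx]
      rw [hgo, countGo_split bound xs]
      simp [tri_zero]
      ring

-- ===== VERDICT (by name: the statement is the Claim_ definition above) =====
theorem count_spec : Claim_equal_count := by
  intro nums bound _
  unfold Spec_count count count_alt
  rw [foldl_count, countGo_split bound nums]
  simp
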